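-- pv_equiv track=rewrite | github.com/Joseph-Ano/Machine-Project-Abstract-Machine-Interpreter | utils.py | get_current_input_state
-- ===== SOURCE A (Python) =====
-- def get_current_input_state(curIndex, user_input):
--     result = ""
--     if(curIndex < 0):
--         result += ">" + user_input
--     elif(curIndex >= len(user_input)):
--         result+= user_input + ">"
--     else:
--         for i in range(len(user_input)):
--             if(i == curIndex):
--                 result += ">"
--             result += user_input[i]
--     return result
-- ===== SOURCE B (Python) =====
-- def get_current_input_state(curIndex, user_input):
--     pos = max(0, min(curIndex, len(user_input)))
--     return user_input[:pos] + ">" + user_input[pos:]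
-- ===== Notes on version B (the rewrite author's own statement) =====
-- stated objective: simpler
-- what changed: Replaces the three-way branch plus character-by-character marker loop with a single clamped index computation and a slice-based insertion.
import Mathlib
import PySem

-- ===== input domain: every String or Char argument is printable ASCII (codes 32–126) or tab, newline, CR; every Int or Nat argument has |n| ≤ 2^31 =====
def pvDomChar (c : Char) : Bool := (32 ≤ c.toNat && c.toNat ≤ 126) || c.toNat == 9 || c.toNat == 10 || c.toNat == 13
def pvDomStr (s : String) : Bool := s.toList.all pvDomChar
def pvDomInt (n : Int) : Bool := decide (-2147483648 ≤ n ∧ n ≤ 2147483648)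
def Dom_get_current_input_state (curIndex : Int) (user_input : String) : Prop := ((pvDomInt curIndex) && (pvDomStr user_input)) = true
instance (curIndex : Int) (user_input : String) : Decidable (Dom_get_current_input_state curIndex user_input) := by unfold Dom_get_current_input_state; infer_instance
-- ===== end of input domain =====

-- B replaces A's three-way branch and character-by-character marker loop by one clamped
-- insertion index and a slice-based insert (objective: simpler).

-- ===== PORT A =====
-- the 'for i in range(len(user_input))' loop, carrying the running result and the index i
def pvALoop (cI : Int) (i : Int) (l : List Char) (acc : List Char) : List Char :=
  match l with
  | [] => acc
  | ch :: rest => pvALoop cI (i + 1) rest ((if i = cI then acc ++ ['>'] else acc) ++ [ch])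

def get_current_input_state (curIndex : Int) (user_input : String) : String :=
  let l := user_input.toList
  if curIndex < 0 then String.mk ('>' :: l)
  else if curIndex ≥ (l.length : Int) then String.mk (l ++ ['>'])
  else String.mk (pvALoop curIndex 0 l [])

-- ===== PORT B =====
-- pos is clamped into [0, len], so Python's slices s[:pos]/s[pos:] are exactly take/drop
def get_current_input_state_alt (curIndex : Int) (user_input : String) : String :=
  let l := user_input.toList
  let pos := max 0 (min curIndex (l.length : Int))
  String.mk (l.take pos.toNat ++ '>' :: l.drop pos.toNat)

-- ===== PRECONDITION & SPEC =====
def Spec_get_current_input_state (curIndex : Int) (user_input : String) (out : String) : Prop := out = get_current_input_state_alt curIndex user_input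
instance (curIndex : Int) (user_input : String) (out : String) : Decidable (Spec_get_current_input_state curIndex user_input out) := by unfold Spec_get_current_input_state; infer_instance

-- ===== CLAIM (what is proved, stated in full; the proofs are below) =====
def Claim_equal_get_current_input_state : Prop := ∀ (curIndex : Int) (user_input : String), Dom_get_current_input_state curIndex user_input → Spec_get_current_input_state curIndex user_input (get_current_input_state curIndex user_input)

-- ===== LEMMAS AND PROOFS =====

theorem pvALoop_acc (cI : Int) (l : List Char) : ∀ (i : Int) (acc : List Char),
    pvALoop cI i l acc = acc ++ pvALoop cI i l [] := by
  induction l with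
  | nil => intro i acc; simp [pvALoop]
  | cons ch rest ih =>
    intro i acc
    simp only [pvALoop]
    rw [ih (i+1), ih (i+1) ((if i = cI then ([] : List Char) ++ ['>'] else []) ++ [ch])]
    split_ifs <;> simp

theorem pvALoop_past (cI : Int) (l : List Char) : ∀ (i : Int) (acc : List Char), cI < i →
    pvALoop cI i l acc = acc ++ l := by
  induction l with
  | nil => intro i acc _; simp [pvALoop]
  | cons ch rest ih =>
    intro i acc h
    simp only [pvALoop]
    rw [if_neg (by omega), ih (i+1) _ (by omega)]
    simp

theorem pvALoop_insert (cI : Int) (l : List Char) : ∀ (i : Int), i ≤ cI → cI - i < (l.length : Int) →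
    pvALoop cI i l [] = l.take (cI - i).toNat ++ '>' :: l.drop (cI - i).toNat := by
  induction l with
  | nil => intro i h1 h2; simp at h2; omega
  | cons ch rest ih =>
    intro i h1 h2
    simp only [pvALoop]
    by_cases hc : i = cI
    · rw [if_pos hc]
      rw [pvALoop_past cI rest (i+1) _ (by omega)]
      have : (cI - i).toNat = 0 := by omega
      simp [this]
    · rw [if_neg hc]
      rw [pvALoop_acc]
      rw [ih (i+1) (by omega) (by simp at h2 ⊢; omega)]
      have hn : (cI - i).toNat = (cI - (i+1)).toNat + 1 := by omega
      simp [hn]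

-- ===== VERDICT (by name: the statement is the Claim_ definition above) =====
theorem get_current_input_state_spec : Claim_equal_get_current_input_state := by
  intro curIndex user_input _
  unfold Spec_get_current_input_state get_current_input_state get_current_input_state_alt
  simp only []
  set l := user_input.toList with hl
  by_cases h1 : curIndex < 0
  · have hp : max 0 (min curIndex (l.length : Int)) = 0 := by omega
    rw [if_pos h1, hp]
    simp
  · rw [if_neg h1]
    by_cases h2 : curIndex ≥ (l.length : Int)
    · have hp : (max 0 (min curIndex (l.length : Int))).toNat = l.length := by omega
      rw [if_pos h2, hp]
      simp
    · rw [if_neg h2]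
      have hp : (max 0 (min curIndex (l.length : Int))).toNat = (curIndex - 0).toNat := by omega
      rw [hp, ← pvALoop_insert curIndex l 0 (by omega) (by omega)]
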